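-- pv_equiv track=rewrite | github.com/lawson89/aoc2022 | exercise8/ex8.py | analyze_slice
-- ===== SOURCE A (Python) =====
-- def analyze_slice(slice_to_analyze: [], reverse_flag=False):
--     if reverse_flag:
--         slice_to_analyze = list(reversed(slice_to_analyze))
--     visibility_slice = [0] * len(slice_to_analyze)
--     max_val = -1
--     for idx, val in enumerate(slice_to_analyze):
--         if val > max_val:
--             visibility_slice[idx] = 1
--             max_val = val
--         else:
--             visibility_slice[idx] = 0
--     if reverse_flag:
--         visibility_slice.reverse()
--     return visibility_slice
-- ===== SOURCE B (Python) =====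
-- def analyze_slice(slice_to_analyze: [], reverse_flag=False):
--     xs = list(reversed(slice_to_analyze)) if reverse_flag else list(slice_to_analyze)
--
--     def solve(seg, seed):
--         # divide and conquer: returns (visibility bits of seg given that the
--         # tallest tree before seg has height seed, max(seed, *seg))
--         if len(seg) <= 1:
--             if not seg:
--                 return [], seed
--             v = seg[0]
--             return ([1], v) if v > seed else ([0], seed)
--         mid = len(seg) // 2
--         lv, lm = solve(seg[:mid], seed)
--         rv, rm = solve(seg[mid:], lm)
--         return lv + rv, rm
--
--     vis, _ = solve(xs, -1)
--     return vis[::-1] if reverse_flag else vis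
-- ===== Notes on version B (the rewrite author's own statement) =====
-- stated objective: alternative
-- what changed: A marks visible elements with one left-to-right fused loop carrying a running maximum; B solves the problem by divide and conquer: it recursively solves the two halves, each half-call returning its visibility bits together with its maximum, and threads the left half's maximum as the seed of the right half.
import Mathlib
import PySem

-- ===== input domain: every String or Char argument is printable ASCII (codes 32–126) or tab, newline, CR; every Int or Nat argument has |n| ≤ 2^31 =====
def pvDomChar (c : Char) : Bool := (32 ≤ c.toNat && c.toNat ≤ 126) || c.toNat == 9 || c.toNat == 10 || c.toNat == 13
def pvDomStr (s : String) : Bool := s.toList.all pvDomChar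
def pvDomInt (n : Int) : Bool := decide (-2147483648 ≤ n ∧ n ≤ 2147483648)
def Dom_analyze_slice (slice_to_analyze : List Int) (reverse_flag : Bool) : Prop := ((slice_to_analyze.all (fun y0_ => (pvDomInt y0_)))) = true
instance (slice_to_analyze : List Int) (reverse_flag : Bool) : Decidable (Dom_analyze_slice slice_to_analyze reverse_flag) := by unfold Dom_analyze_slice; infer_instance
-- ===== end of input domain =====

-- ===== PORT A =====
-- B replaces A's single fused running-maximum loop by a divide-and-conquer recursion on
-- halves, each call returning (visibility bits, maximum) and threading the left maximum
-- into the right half (alternative decomposition, same results).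
def analyze_slice (slice_to_analyze : List Int) (reverse_flag : Bool) : List Int :=
  let s := if reverse_flag then slice_to_analyze.reverse else slice_to_analyze
  let vis := (s.foldl (fun (st : Int × List Int) (val : Int) =>
      if st.1 < val then (val, st.2 ++ [(1 : Int)]) else (st.1, st.2 ++ [(0 : Int)])) (-1, [])).2
  if reverse_flag then vis.reverse else vis

-- ===== PORT B =====
def dacSolve (seg : List Int) (seed : Int) : List Int × Int :=
  if _h : seg.length ≤ 1 then
    match seg with
    | [] => ([], seed)
    | v :: _ => if seed < v then ([(1 : Int)], v) else ([(0 : Int)], seed)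
  else
    let mid := seg.length / 2
    let l := dacSolve (seg.take mid) seed
    let r := dacSolve (seg.drop mid) l.2
    (l.1 ++ r.1, r.2)
termination_by seg.length
decreasing_by
  · simp only [List.length_take]; omega
  · simp only [List.length_drop]; omega

def analyze_slice_alt (slice_to_analyze : List Int) (reverse_flag : Bool) : List Int :=
  let xs := if reverse_flag then slice_to_analyze.reverse else slice_to_analyze
  let vis := (dacSolve xs (-1)).1
  if reverse_flag then vis.reverse else vis

-- ===== PRECONDITION & SPEC =====
def Spec_analyze_slice (slice_to_analyze : List Int) (reverse_flag : Bool) (out : List Int) : Prop := out = analyze_slice_alt slice_to_analyze reverse_flag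
instance (slice_to_analyze : List Int) (reverse_flag : Bool) (out : List Int) : Decidable (Spec_analyze_slice slice_to_analyze reverse_flag out) := by unfold Spec_analyze_slice; infer_instance

-- ===== CLAIM (what is proved, stated in full; the proofs are below) =====
def Claim_equal_analyze_slice : Prop := ∀ (slice_to_analyze : List Int) (reverse_flag : Bool), Dom_analyze_slice slice_to_analyze reverse_flag → Spec_analyze_slice slice_to_analyze reverse_flag (analyze_slice slice_to_analyze reverse_flag)

-- ===== LEMMAS AND PROOFS =====

-- A's loop body, named for the lemmas
def loopF : Int × List Int → Int → Int × List Int :=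
  fun st val => if st.1 < val then (val, st.2 ++ [(1 : Int)]) else (st.1, st.2 ++ [(0 : Int)])

-- the accumulator only prefixes the emitted bits; the running maximum ignores it
lemma foldl_acc (xs : List Int) : ∀ (m : Int) (acc : List Int),
    xs.foldl loopF (m, acc) = ((xs.foldl loopF (m, [])).1, acc ++ (xs.foldl loopF (m, [])).2) := by
  induction xs with
  | nil => intro m acc; simp
  | cons v t ih =>
    intro m acc
    by_cases h : m < v
    · simp only [List.foldl_cons, loopF, h, if_pos]
      rw [ih v (acc ++ [1])]
      rw [show ([] : List Int) ++ [(1:Int)] = [1] from rfl, ih v [1]]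
      simp
    · simp only [List.foldl_cons, loopF, h, if_neg, not_false_iff]
      rw [ih m (acc ++ [0])]
      rw [show ([] : List Int) ++ [(0:Int)] = [0] from rfl, ih m [0]]
      simp

-- divide and conquer agrees with A's loop: bits and maximum coincide
lemma dac_eq_loop (seg : List Int) (seed : Int) :
    dacSolve seg seed = ((seg.foldl loopF (seed, [])).2, (seg.foldl loopF (seed, [])).1) := by
  induction seg, seed using dacSolve.induct with
  | case1 seed h _ =>
    rw [dacSolve]; simp
  | case2 seed v t h hv _ =>
    have ht : t = [] := by
      match t, h with
      | [], _ => rfl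
      | _ :: _, h => simp at h
    subst ht
    rw [dacSolve]
    simp [hv, loopF]
  | case3 seed v t h hv _ =>
    have ht : t = [] := by
      match t, h with
      | [], _ => rfl
      | _ :: _, h => simp at h
    subst ht
    rw [dacSolve]
    simp [hv, loopF]
  | case4 seg seed h mid l _ ihl ihr =>
    rw [dacSolve]
    simp only [h, dif_neg, not_false_iff]
    rw [← List.take_append_drop (seg.length / 2) seg, List.foldl_append]
    rw [foldl_acc (seg.drop (seg.length / 2)) (((seg.take (seg.length / 2)).foldl loopF (seed, [])).1)
        (((seg.take (seg.length / 2)).foldl loopF (seed, [])).2)]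
    simp only [List.take_append_drop]
    have ihr2 : dacSolve (List.drop (seg.length / 2) seg) (dacSolve (List.take (seg.length / 2) seg) seed).2 =
        ((List.foldl loopF ((dacSolve (List.take (seg.length / 2) seg) seed).2, []) (List.drop (seg.length / 2) seg)).2,
         (List.foldl loopF ((dacSolve (List.take (seg.length / 2) seg) seed).2, []) (List.drop (seg.length / 2) seg)).1) := ihr
    rw [ihl] at ihr2 ⊢
    simp only [ihr2]

-- ===== VERDICT (by name: the statement is the Claim_ definition above) =====
theorem analyze_slice_spec : Claim_equal_analyze_slice := by
  intro s r _
  unfold Spec_analyze_slice analyze_slice analyze_slice_alt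
  simp only [show (fun (st : Int × List Int) (val : Int) =>
      if st.1 < val then (val, st.2 ++ [(1 : Int)]) else (st.1, st.2 ++ [(0 : Int)])) = loopF from rfl,
    dac_eq_loop]
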